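-- pv_equiv track=rewrite | github.com/hima-v/py_dev | CodeChef_Beginner/practice/Snapchat.py | scount
-- ===== SOURCE A (Python) =====
-- def scount(n,l1,l2):
--     maxstreak=0
--     streak=0
--     i=0
--     for i in range (0,n):
--         if(l1[i]!=0 and l2[i]!=0):
--             streak+=1
--             if streak>maxstreak:
--                 maxstreak=streak
--         else:
--             streak=0
--     return(maxstreak)
-- ===== SOURCE B (Python) =====
-- def scount(n, l1, l2):
--     # Two-stage: build the boolean sequence, then scan it run-by-run with two pointers.
--     preds = [l1[i] != 0 and l2[i] != 0 for i in range(n)]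
--     best = 0
--     i = 0
--     while i < len(preds):
--         if preds[i]:
--             j = i
--             while j < len(preds) and preds[j]:
--                 j += 1
--             best = max(best, j - i)
--             i = j
--         else:
--             i += 1
--     return best
-- ===== Notes on version B (the rewrite author's own statement) =====
-- stated objective: alternative
-- what changed: Replaces A's single accumulator loop (streak/maxstreak updated per element) with a two-stage algorithm: first materialise the boolean sequence preds, then a two-pointer scan that jumps over each whole run of True and takes the max run length.
import Mathlib
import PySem

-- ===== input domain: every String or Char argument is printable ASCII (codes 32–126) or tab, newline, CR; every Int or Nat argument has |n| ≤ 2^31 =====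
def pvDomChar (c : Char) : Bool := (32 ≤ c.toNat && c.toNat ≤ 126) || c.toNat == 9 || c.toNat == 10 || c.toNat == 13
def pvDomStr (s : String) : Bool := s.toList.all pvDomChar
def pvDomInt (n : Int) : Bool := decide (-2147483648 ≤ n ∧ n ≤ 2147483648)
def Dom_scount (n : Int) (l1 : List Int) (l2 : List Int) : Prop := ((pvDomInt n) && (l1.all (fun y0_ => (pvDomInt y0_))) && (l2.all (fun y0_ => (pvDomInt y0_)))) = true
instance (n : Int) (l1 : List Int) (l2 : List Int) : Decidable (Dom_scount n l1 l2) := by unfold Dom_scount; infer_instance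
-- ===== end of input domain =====

-- B replaces A's single accumulator loop with a two-stage algorithm (build the boolean
-- sequence, then a two-pointer scan over whole runs); objective: alternative decomposition.

-- ===== PORT A =====
-- A's loop: state (maxstreak, streak), iterate i over range(0, n).
def scount (n : Int) (l1 : List Int) (l2 : List Int) : Int :=
  (((PySem.List.pyRange 0 n 1).foldl (fun (p : Int × Int) i =>
      if (PySem.List.pyGet? l1 i).getD 0 ≠ 0 ∧ (PySem.List.pyGet? l2 i).getD 0 ≠ 0 then
        (if p.2 + 1 > p.1 then p.2 + 1 else p.1, p.2 + 1)
      else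
        (p.1, 0)) (0, 0))).1

-- ===== PORT B =====
-- the comprehension [l1[i] != 0 and l2[i] != 0 for i in range(n)]
def predsOf (n : Int) (l1 : List Int) (l2 : List Int) : List Bool :=
  (PySem.List.pyRange 0 n 1).map (fun i =>
    decide ((PySem.List.pyGet? l1 i).getD 0 ≠ 0) && decide ((PySem.List.pyGet? l2 i).getD 0 ≠ 0))

-- the two-pointer while loop: skip a False one step at a time; on a True, jump past the
-- whole run (takeWhile/dropWhile = the inner 'while preds[j]' scan) and update best.
def scanRuns (acc : Int) : List Bool → Int
  | [] => acc
  | false :: bs => scanRuns acc bs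
  | true :: bs =>
      scanRuns (max acc (1 + ((bs.takeWhile (· = true)).length : Int))) (bs.dropWhile (· = true))
termination_by bs => bs.length
decreasing_by simp; exact Nat.lt_succ_of_le (List.length_dropWhile_le _ _)

def scount_alt (n : Int) (l1 : List Int) (l2 : List Int) : Int :=
  scanRuns 0 (predsOf n l1 l2)

-- ===== PRECONDITION & SPEC =====
-- Pre_ excludes exactly the inputs where Python A raises IndexError: n exceeding a list length.
def Pre_scount (n : Int) (l1 : List Int) (l2 : List Int) : Prop :=
  n ≤ (l1.length : Int) ∧ n ≤ (l2.length : Int)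
instance (n : Int) (l1 : List Int) (l2 : List Int) : Decidable (Pre_scount n l1 l2) := by
  unfold Pre_scount; infer_instance

def pvWitness_scount : Int × List Int × List Int := (4, [1, 0, 2, 3], [1, 5, 2, 1])

def Spec_scount (n : Int) (l1 : List Int) (l2 : List Int) (out : Int) : Prop := out = scount_alt n l1 l2
instance (n : Int) (l1 : List Int) (l2 : List Int) (out : Int) : Decidable (Spec_scount n l1 l2 out) := by unfold Spec_scount; infer_instance

-- ===== CLAIM (what is proved, stated in full; the proofs are below) =====
def Claim_equal_scount : Prop := ∀ (n : Int) (l1 : List Int) (l2 : List Int), Dom_scount n l1 l2 → Pre_scount n l1 l2 → Spec_scount n l1 l2 (scount n l1 l2)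

-- ===== LEMMAS AND PROOFS =====

-- the canonical "longest run" value both sides are reduced to:
-- fmax s bs = largest value the streak counter reaches (0 if it never increments),
-- starting from an ongoing streak of length s.
def fmax (s : Int) : List Bool → Int
  | [] => 0
  | true :: bs => max (s + 1) (fmax (s + 1) bs)
  | false :: bs => fmax 0 bs

theorem fmax_nonneg (bs : List Bool) (s : Int) : 0 ≤ fmax s bs := by
  induction bs generalizing s with
  | nil => simp [fmax]
  | cons b bs ih =>
      cases b
      · exact ih 0
      · exact le_trans (ih (s + 1)) (le_max_right _ _)

-- A's fold equals max m (fmax s bs)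
theorem foldA_eq (bs : List Bool) (m s : Int) (hm : 0 ≤ m) :
    (bs.foldl (fun (p : Int × Int) b =>
        if b then (if p.2 + 1 > p.1 then p.2 + 1 else p.1, p.2 + 1) else (p.1, 0)) (m, s)).1
      = max m (fmax s bs) := by
  induction bs generalizing m s with
  | nil => show m = max m (fmax s []); simp [fmax]; omega
  | cons b bs ih =>
      cases b with
      | false =>
          simp only [List.foldl_cons]
          rw [if_neg (by simp)]
          exact ih m 0 hm
      | true =>
          have h1 : (true :: bs).foldl (fun (p : Int × Int) b =>
              if b then (if p.2 + 1 > p.1 then p.2 + 1 else p.1, p.2 + 1) else (p.1, 0)) (m, s)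
            = bs.foldl (fun (p : Int × Int) b =>
              if b then (if p.2 + 1 > p.1 then p.2 + 1 else p.1, p.2 + 1) else (p.1, 0))
              (if s + 1 > m then s + 1 else m, s + 1) := rfl
          rw [h1, ih (if s + 1 > m then s + 1 else m) (s + 1) (by omega)]
          show _ = max m (max (s + 1) (fmax (s + 1) bs))
          omega

-- fmax ignores the size of an ongoing streak when the list does not start with true
theorem fmax_start (bs : List Bool) (s : Int) (h : bs.head? ≠ some true) :
    fmax s bs = fmax 0 bs := by
  cases bs with
  | nil => rfl
  | cons b bs => cases b with
    | false => rfl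
    | true => simp at h

-- absorbing a run of trues into the streak counter
theorem fmax_trues (run : List Bool) (rest : List Bool) (s : Int)
    (hrun : ∀ x ∈ run, x = true) :
    max (s + 1) (fmax (s + 1) (run ++ rest))
      = max (s + 1 + (run.length : Int)) (fmax (s + 1 + (run.length : Int)) rest) := by
  induction run generalizing s with
  | nil => simp
  | cons b r ih =>
      have hb : b = true := hrun b (by simp)
      subst hb
      have h1 := ih (s + 1) (fun x hx => hrun x (by simp [hx]))
      simp only [List.cons_append, fmax]
      have h2 : max (s + 1) (max (s + 1 + 1) (fmax (s + 1 + 1) (r ++ rest)))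
          = max (s + 1 + 1) (fmax (s + 1 + 1) (r ++ rest)) := by omega
      rw [h2, h1]
      have h3 : s + 1 + 1 + (r.length : Int) = s + 1 + (((true :: r : List Bool)).length : Int) := by
        simp; omega
      rw [h3]

-- B's two-pointer scan computes max acc (fmax 0 bs)
theorem scanRuns_eq_aux (k : Nat) : ∀ (bs : List Bool), bs.length ≤ k → ∀ acc : Int, 0 ≤ acc →
    scanRuns acc bs = max acc (fmax 0 bs) := by
  induction k with
  | zero =>
      intro bs h acc hacc
      have hbs : bs = [] := by cases bs <;> simp_all
      subst hbs
      rw [scanRuns]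
      simp [fmax]; omega
  | succ k ih =>
      intro bs h acc hacc
      match bs with
      | [] => rw [scanRuns]; simp [fmax]; omega
      | false :: bs =>
          rw [scanRuns]
          show scanRuns acc bs = max acc (fmax 0 (false :: bs))
          exact ih bs (by simp at h; omega) acc hacc
      | true :: bs =>
          rw [scanRuns]
          have hsplit : bs.takeWhile (· = true) ++ bs.dropWhile (· = true) = bs :=
            List.takeWhile_append_dropWhile
          have hlen : (bs.dropWhile (· = true)).length ≤ k :=
            le_trans (List.length_dropWhile_le _ _) (by simp at h; omega)
          rw [ih _ hlen _ (le_trans hacc (le_max_left _ _))]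
          have hrun : ∀ x ∈ bs.takeWhile (· = true), x = true := by
            intro x hx
            simpa using List.mem_takeWhile_imp hx
          have hhead : (bs.dropWhile (· = true)).head? ≠ some true := by
            intro hcon
            have hw : bs.dropWhile (· = true) ≠ [] := by
              intro hnil; rw [hnil] at hcon; simp at hcon
            have hnp := List.head_dropWhile_not (· = true) hw
            rw [List.head?_eq_some_head hw] at hcon
            rw [Option.some_inj] at hcon
            simp at hcon hnp
            simp [hnp] at hcon
          have hfm : fmax 0 (true :: bs)
              = max (1 + ((bs.takeWhile (· = true)).length : Int)) (fmax 0 (bs.dropWhile (· = true))) := by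
            show max (0 + 1) (fmax (0 + 1) bs) = _
            conv_lhs => rw [← hsplit]
            rw [fmax_trues _ _ 0 hrun, fmax_start _ _ hhead]
            norm_num
          rw [hfm]
          omega

-- A's indexed fold equals the streak function on the boolean sequence
theorem scount_eq_fmax (n : Int) (l1 : List Int) (l2 : List Int) :
    scount n l1 l2 = fmax 0 (predsOf n l1 l2) := by
  unfold scount predsOf
  have h := foldA_eq ((PySem.List.pyRange 0 n 1).map (fun i =>
    decide ((PySem.List.pyGet? l1 i).getD 0 ≠ 0) && decide ((PySem.List.pyGet? l2 i).getD 0 ≠ 0))) 0 0 le_rfl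
  rw [List.foldl_map] at h
  simp only [Bool.and_eq_true, decide_eq_true_eq] at h
  rw [h]
  have := fmax_nonneg ((PySem.List.pyRange 0 n 1).map (fun i =>
    decide ((PySem.List.pyGet? l1 i).getD 0 ≠ 0) && decide ((PySem.List.pyGet? l2 i).getD 0 ≠ 0))) 0
  omega

-- ===== VERDICT (by name: the statement is the Claim_ definition above) =====
theorem scount_spec : Claim_equal_scount := by
  intro n l1 l2 _ _
  unfold Spec_scount scount_alt
  rw [scanRuns_eq_aux (predsOf n l1 l2).length _ le_rfl 0 le_rfl]
  rw [scount_eq_fmax]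
  have := fmax_nonneg (predsOf n l1 l2) 0
  omega
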